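-- pv_equiv track=rewrite | github.com/ekatellv/practice_15 | ex_13.py | odd_list
-- ===== SOURCE A (Python) =====
-- def odd_list(a: list[int], n: int) -> list[int]:
--
--     """
--     Return a list containing only even numbers from the input list.
--
--     Parameters:
--     a : list
--         List of integers
--     n : int
--         Number of elements to process (typically len(a), but can be less)
--
--     Returns:
--     list[int]
--         List containing only even numbers from the first n elements of a
--     """
--
--     if n == 0:
--         return []
--
--     even_numbers_in_rest = odd_list(a, n - 1)
--     current_element = a[n - 1]
--
--     if current_element % 2 == 0:
--         return even_numbers_in_rest + [current_element]
--     else: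
--         return even_numbers_in_rest
-- ===== SOURCE B (Python) =====
-- def odd_list(a: list[int], n: int) -> list[int]:
--     result = []
--     for i in range(n):
--         if a[i] % 2 == 0:
--             result.append(a[i])
--     return result
-- ===== Notes on version B (the rewrite author's own statement) =====
-- stated objective: idiomatic
-- what changed: Replaced the build-on-unwind recursion with a flat ascending for-loop over range(n) appending even elements to an accumulator list.
-- crash fix: For n < 0 A raises RecursionError (infinite recursion); B's range(n) is empty there so B returns []. — e.g. on odd_list([1, 2], -1): A raises RecursionError, B returns []
import Mathlib
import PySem

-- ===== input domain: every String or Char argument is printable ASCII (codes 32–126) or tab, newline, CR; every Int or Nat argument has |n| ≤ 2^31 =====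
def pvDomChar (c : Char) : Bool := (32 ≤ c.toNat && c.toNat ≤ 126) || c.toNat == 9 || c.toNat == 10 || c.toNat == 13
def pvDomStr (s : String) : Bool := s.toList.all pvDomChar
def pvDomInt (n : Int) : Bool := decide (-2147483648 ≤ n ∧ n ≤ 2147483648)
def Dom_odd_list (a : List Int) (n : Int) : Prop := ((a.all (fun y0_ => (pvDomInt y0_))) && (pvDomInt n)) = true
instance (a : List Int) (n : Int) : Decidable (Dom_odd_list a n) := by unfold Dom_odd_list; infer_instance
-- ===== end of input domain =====

-- B replaces A's build-on-unwind recursion with a flat ascending loop over range(n); same values, no deep call stack.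

-- ===== PORT A =====
-- A recurses on n down to 0 and accesses a[n-1] on the unwind; the recursion is carried by n.toNat
-- (for n < 0 Python A never terminates, excluded by Pre_; for an out-of-range index, excluded by Pre_,
-- pyGet? is none where Python raises IndexError and the port returns rest there, a value A never produces).
def odd_listGo (a : List Int) : Nat → List Int
  | 0 => []
  | m + 1 =>
    let rest := odd_listGo a m
    match PySem.List.pyGet? a (m : Int) with
    | some cur => if PySem.Int.mod cur 2 = 0 then rest ++ [cur] else rest
    | none => rest

def odd_list (a : List Int) (n : Int) : List Int := odd_listGo a n.toNat

-- ===== PORT B =====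
def odd_list_alt (a : List Int) (n : Int) : List Int :=
  (PySem.List.pyRange 0 n 1).foldl
    (fun res i =>
      match PySem.List.pyGet? a i with
      | some x => if PySem.Int.mod x 2 = 0 then res ++ [x] else res
      | none => res) []

-- ===== PRECONDITION & SPEC =====
-- Pre_ excludes n < 0 (A: infinite recursion, RecursionError) and n > len(a) (A: IndexError).
def Pre_odd_list (a : List Int) (n : Int) : Prop := 0 ≤ n ∧ n ≤ a.length
instance (a : List Int) (n : Int) : Decidable (Pre_odd_list a n) := by unfold Pre_odd_list; infer_instance
def pvWitness_odd_list : List Int × Int := ([1, 2, 3, 4], 3)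

-- For n < 0 A raises RecursionError (infinite recursion) while B's empty range(n) makes it return [].
def Raises_odd_list (a : List Int) (n : Int) : Prop := n < 0
instance (a : List Int) (n : Int) : Decidable (Raises_odd_list a n) := by unfold Raises_odd_list; infer_instance
def pvRaiseWitness_odd_list : List Int × Int := ([1, 2], -1)
def pvRaiseWitnessOut_odd_list : List Int := []

def Spec_odd_list (a : List Int) (n : Int) (out : List Int) : Prop := out = odd_list_alt a n
instance (a : List Int) (n : Int) (out : List Int) : Decidable (Spec_odd_list a n out) := by unfold Spec_odd_list; infer_instance

-- ===== CLAIM =====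
def Claim_equal_odd_list : Prop := ∀ (a : List Int) (n : Int), Dom_odd_list a n → Pre_odd_list a n → Spec_odd_list a n (odd_list a n)
def Claim_raises_odd_list : Prop := (∀ (a : List Int) (n : Int), Dom_odd_list a n → Raises_odd_list a n → ¬ Pre_odd_list a n) ∧ (Dom_odd_list (pvRaiseWitness_odd_list.1) (pvRaiseWitness_odd_list.2) ∧ Raises_odd_list (pvRaiseWitness_odd_list.1) (pvRaiseWitness_odd_list.2) ∧ odd_list_alt (pvRaiseWitness_odd_list.1) (pvRaiseWitness_odd_list.2) = pvRaiseWitnessOut_odd_list)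

-- ===== LEMMAS AND PROOFS =====
theorem odd_listGo_eq_foldl (a : List Int) (m : Nat) :
    odd_listGo a m = (PySem.List.pyRange 0 (m : Int) 1).foldl
      (fun res i =>
        match PySem.List.pyGet? a i with
        | some x => if PySem.Int.mod x 2 = 0 then res ++ [x] else res
        | none => res) [] := by
  induction m with
  | zero => simp [odd_listGo, PySem.List.pyRange_one_eq_nil]
  | succ m ih =>
    have h : PySem.List.pyRange 0 ((m : Int) + 1) 1
        = PySem.List.pyRange 0 (m : Int) 1 ++ [(m : Int)] :=
      PySem.List.pyRange_one_succ_right (by exact_mod_cast Int.natCast_nonneg m)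
    simp only [odd_listGo, Nat.cast_succ, h, List.foldl_append, List.foldl_cons, List.foldl_nil, ← ih]

-- ===== VERDICT =====
theorem odd_list_spec : Claim_equal_odd_list := by
  intro a n _ hpre
  unfold Spec_odd_list odd_list odd_list_alt
  rw [odd_listGo_eq_foldl]
  congr 1
  exact congrArg (fun k => PySem.List.pyRange 0 k 1) (Int.toNat_of_nonneg hpre.1)

def odd_list_raises : Claim_raises_odd_list := by
  unfold Claim_raises_odd_list
  refine ⟨?_, by decide⟩
  intro a n _ hr hpre
  unfold Raises_odd_list at hr
  unfold Pre_odd_list at hpre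
  omega
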